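-- pv_equiv track=rewrite | github.com/wdrink/PyDeepFakeDet | preprocess/DeeperForensics-1.0.py | parse_source_videos
-- ===== SOURCE A (Python) =====
-- def parse_source_videos(source_videos):
--     d = {}
--     for video in source_videos:
--         name = video[14:18]
--         if name in d:
--             d[name].append(video)
--         else:
--             d[name] = [video]
--     return d
-- ===== SOURCE B (Python) =====
-- def parse_source_videos(source_videos):
--     # Two-pass: ordered distinct keys first, then one filter per key.
--     keys = dict.fromkeys(v[14:18] for v in source_videos)
--     return {k: [v for v in source_videos if v[14:18] == k] for k in keys}
-- ===== Notes on version B (the rewrite author's own statement) =====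
-- stated objective: alternative
-- what changed: Replaces A's single-pass hash bucketing with a two-pass scheme: collect the ordered distinct keys via dict.fromkeys, then build each group with a filter comprehension over the whole list.
import Mathlib
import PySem

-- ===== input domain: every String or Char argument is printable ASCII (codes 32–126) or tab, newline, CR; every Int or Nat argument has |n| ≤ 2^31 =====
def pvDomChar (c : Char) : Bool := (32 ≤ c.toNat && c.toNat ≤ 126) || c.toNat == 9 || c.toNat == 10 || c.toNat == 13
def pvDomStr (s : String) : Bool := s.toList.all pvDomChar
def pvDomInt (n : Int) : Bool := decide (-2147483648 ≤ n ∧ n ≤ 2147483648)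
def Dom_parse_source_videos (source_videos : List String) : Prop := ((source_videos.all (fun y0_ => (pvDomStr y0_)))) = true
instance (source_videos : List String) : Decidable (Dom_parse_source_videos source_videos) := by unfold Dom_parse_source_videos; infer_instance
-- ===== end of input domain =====

-- B replaces A's single-pass dict bucketing by a two-pass scheme (ordered distinct keys, then one filter per key); objective: alternative decomposition, same return value.


-- ===== PORT A =====
-- video[14:18], shared key of both programs
def pvKey (v : String) : String := PySem.Str.slice v (some 14) (some 18)

def parse_source_videos (source_videos : List String) : List (String × List String) :=
  let d := source_videos.foldl (fun d video =>
    let name := pvKey video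
    if d.contains name then
      d.insert name (d.getD name [] ++ [video])
    else
      d.insert name [video]) PySem.Dict.empty
  d.items

-- ===== PORT B =====
def parse_source_videos_alt (source_videos : List String) : List (String × List String) :=
  let keys := PySem.List.dedup (source_videos.map pvKey)
  keys.map (fun k => (k, source_videos.filter (fun v => pvKey v == k)))

-- ===== PRECONDITION & SPEC =====
def Spec_parse_source_videos (source_videos : List String) (out : List (String × List String)) : Prop := out = parse_source_videos_alt source_videos
instance (source_videos : List String) (out : List (String × List String)) : Decidable (Spec_parse_source_videos source_videos out) := by unfold Spec_parse_source_videos; infer_instance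

-- ===== CLAIM (what is proved, stated in full; the proofs are below) =====
def Claim_equal_parse_source_videos : Prop := ∀ (source_videos : List String), Dom_parse_source_videos source_videos → Spec_parse_source_videos source_videos (parse_source_videos source_videos)

-- ===== LEMMAS AND PROOFS =====
-- A's loop body is exactly Dict.modify with default [].
theorem pv_step_eq (d : PySem.Dict String (List String)) (v : String) :
    (if d.contains (pvKey v) then d.insert (pvKey v) (d.getD (pvKey v) [] ++ [v])
     else d.insert (pvKey v) [v])
    = d.modify (pvKey v) [] (· ++ [v]) := by
  by_cases h : d.contains (pvKey v)
  · simp [h, PySem.Dict.modify, PySem.Dict.getD]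
  · simp only [Bool.not_eq_true] at h
    simp [h, PySem.Dict.modify, PySem.Dict.getD,
      (PySem.Dict.get?_eq_none_iff_contains _ _).mpr h]

theorem pv_main (vs : List String) :
    parse_source_videos vs = parse_source_videos_alt vs := by
  unfold parse_source_videos parse_source_videos_alt
  simp only [pv_step_eq]
  have hfold : vs.foldl (fun (d : PySem.Dict String (List String)) v => d.modify (pvKey v) [] (· ++ [v])) PySem.Dict.empty
      = (vs.map (fun v => (pvKey v, v))).foldl (fun (d : PySem.Dict String (List String)) p => d.modify p.1 [] (· ++ [p.2])) PySem.Dict.empty := by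
    rw [List.foldl_map]
  rw [hfold]
  set pairs := vs.map (fun v => (pvKey v, v)) with hp
  set D := pairs.foldl (fun (d : PySem.Dict String (List String)) p => d.modify p.1 [] (· ++ [p.2])) PySem.Dict.empty with hD
  have hnd : D.keys.Nodup := by
    rw [hD, hp, List.foldl_map]
    exact PySem.Dict.nodup_keys_foldl_modify_key vs pvKey [] _ _ PySem.Dict.nodup_keys_empty
  rw [PySem.Dict.items_eq_map_keys D hnd []]
  have hkeys : D.keys = PySem.List.dedup (vs.map pvKey) := by
    rw [hD, hp, List.foldl_map]
    rw [PySem.Dict.keys_foldl_modify_key]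
    simp [PySem.List.dedup_eq_ofList, PySem.Set.ofList_eq_foldl, PySem.Set.update,
      PySem.Dict.keys_empty]
  rw [hkeys]
  apply List.map_congr_left
  intro k hk
  have hget : D.getD k [] = (pairs.filter (fun p => p.1 == k)).map (·.2) := by
    rw [hD, PySem.Dict.getD_foldl_modify_append]
    simp [PySem.Dict.getD_empty]
  rw [hget, hp]
  congr 1
  rw [List.filter_map, List.map_map]
  simp [Function.comp_def]

-- ===== VERDICT (by name: the statement is the Claim_ definition above) =====
theorem parse_source_videos_spec : Claim_equal_parse_source_videos := by
  intro vs _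
  unfold Spec_parse_source_videos
  exact pv_main vs
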